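-- pv_equiv track=rewrite | github.com/Nikhilesh-B/CompetitiveProgrammingPractice | competitive programming questions/findallanagarams.py | dics_equal
-- ===== SOURCE A (Python) =====
-- def dics_equal(dic1: dict, dic2: dict):
--     keys = set(dic1.keys()).union(set(dic2.keys()))
--     for key in keys:
--         if key not in dic2 or key not in dic1:
--             return False
--         elif dic1[key] != dic2[key]:
--             return False
--     return True
-- ===== SOURCE B (Python) =====
-- def dics_equal(dic1: dict, dic2: dict):
--     if len(dic1) != len(dic2):
--         return False
--     for key, value in dic1.items():
--         if key not in dic2 or dic2[key] != value:
--             return False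
--     return True
-- ===== Notes on version B (the rewrite author's own statement) =====
-- stated objective: simpler
-- what changed: B drops A's union-of-key-sets construction and symmetric two-dict scan: it compares the lengths once and then makes a single pass over dic1.items(), the length equality guaranteeing the key sets coincide.
import Mathlib
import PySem

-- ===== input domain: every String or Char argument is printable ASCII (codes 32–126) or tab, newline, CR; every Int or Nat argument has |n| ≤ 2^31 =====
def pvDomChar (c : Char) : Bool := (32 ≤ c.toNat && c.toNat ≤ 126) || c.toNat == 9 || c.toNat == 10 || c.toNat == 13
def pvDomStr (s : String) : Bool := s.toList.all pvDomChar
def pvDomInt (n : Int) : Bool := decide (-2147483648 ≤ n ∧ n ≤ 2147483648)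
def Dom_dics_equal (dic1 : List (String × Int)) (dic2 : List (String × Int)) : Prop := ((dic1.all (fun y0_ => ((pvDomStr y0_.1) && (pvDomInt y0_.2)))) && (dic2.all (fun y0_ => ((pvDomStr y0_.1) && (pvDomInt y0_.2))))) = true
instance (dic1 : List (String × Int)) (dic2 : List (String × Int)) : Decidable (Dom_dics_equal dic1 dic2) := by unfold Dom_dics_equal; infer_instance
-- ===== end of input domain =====

-- B replaces A's union-of-key-sets + symmetric scan of both dicts by a length check and a
-- single pass over dic1's items (objective: simpler).

-- ===== PORT A =====
-- 'for key in keys: …' iterates a Python set; the loop's result (False iff some key fails,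
-- else True) does not depend on the iteration order, so folding the PySem.Set list is exact.
def pvALoop (dic1 dic2 : List (String × Int)) : List String → Bool
  | [] => true
  | k :: ks =>
    if ¬ (PySem.Dict.mk dic2).contains k ∨ ¬ (PySem.Dict.mk dic1).contains k then false
    else if (PySem.Dict.mk dic1).get? k ≠ (PySem.Dict.mk dic2).get? k then false
    else pvALoop dic1 dic2 ks

def dics_equal (dic1 : List (String × Int)) (dic2 : List (String × Int)) : Bool :=
  pvALoop dic1 dic2
    (PySem.Set.union (PySem.Set.ofList (dic1.map Prod.fst)) (PySem.Set.ofList (dic2.map Prod.fst)))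

-- ===== PORT B =====
def pvBLoop (dic2 : List (String × Int)) : List (String × Int) → Bool
  | [] => true
  | (k, v) :: rest =>
    match (PySem.Dict.mk dic2).get? k with
    | none => false
    | some w => if v ≠ w then false else pvBLoop dic2 rest

def dics_equal_alt (dic1 : List (String × Int)) (dic2 : List (String × Int)) : Bool :=
  if dic1.length ≠ dic2.length then false else pvBLoop dic2 dic1

-- ===== PRECONDITION & SPEC =====
-- Pre_ only states that each association list has pairwise-distinct keys — i.e. that it
-- really represents a Python dict (a Python dict can never contain a duplicate key), so no
-- Python-representable input is excluded.
def Pre_dics_equal (dic1 : List (String × Int)) (dic2 : List (String × Int)) : Prop :=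
  (dic1.map Prod.fst).Nodup ∧ (dic2.map Prod.fst).Nodup
instance (dic1 : List (String × Int)) (dic2 : List (String × Int)) : Decidable (Pre_dics_equal dic1 dic2) := by unfold Pre_dics_equal; infer_instance

def pvWitness_dics_equal : (List (String × Int)) × (List (String × Int)) :=
  ([("a", 1), ("b", 2)], [("b", 2), ("a", 1)])

def Spec_dics_equal (dic1 : List (String × Int)) (dic2 : List (String × Int)) (out : Bool) : Prop := out = dics_equal_alt dic1 dic2
instance (dic1 : List (String × Int)) (dic2 : List (String × Int)) (out : Bool) : Decidable (Spec_dics_equal dic1 dic2 out) := by unfold Spec_dics_equal; infer_instance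

-- ===== CLAIM (what is proved, stated in full; the proofs are below) =====
def Claim_equal_dics_equal : Prop := ∀ (dic1 : List (String × Int)) (dic2 : List (String × Int)), Dom_dics_equal dic1 dic2 → Pre_dics_equal dic1 dic2 → Spec_dics_equal dic1 dic2 (dics_equal dic1 dic2)

-- ===== LEMMAS AND PROOFS =====

-- A's loop over a key list returns true iff every key passes both tests.
theorem pvALoop_eq_true_iff (dic1 dic2 : List (String × Int)) (L : List String) :
    pvALoop dic1 dic2 L = true ↔
      ∀ k ∈ L, (PySem.Dict.mk dic2).contains k = true ∧ (PySem.Dict.mk dic1).contains k = true ∧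
        (PySem.Dict.mk dic1).get? k = (PySem.Dict.mk dic2).get? k := by
  induction L with
  | nil => simp [pvALoop]
  | cons k ks ih =>
    simp only [pvALoop, List.mem_cons]
    split_ifs with h1 h2
    · constructor
      · intro h; cases h
      · intro h
        rcases h k (Or.inl rfl) with ⟨hc2, hc1, _⟩
        rcases h1 with h1 | h1 <;> simp_all
    · constructor
      · intro h; cases h
      · intro h
        exact absurd (h k (Or.inl rfl)).2.2 h2
    · push Not at h1
      rw [ih]
      constructor
      · intro h x hx
        rcases hx with rfl | hx
        · exact ⟨by simpa using h1.1, by simpa using h1.2, by simpa using h2⟩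
        · exact h x hx
      · intro h x hx; exact h x (Or.inr hx)

-- B's loop over dic1's items returns true iff every item is found in dic2 with the same value.
theorem pvBLoop_eq_true_iff (dic2 : List (String × Int)) (l : List (String × Int)) :
    pvBLoop dic2 l = true ↔ ∀ p ∈ l, (PySem.Dict.mk dic2).get? p.1 = some p.2 := by
  induction l with
  | nil => simp [pvBLoop]
  | cons p rest ih =>
    obtain ⟨k, v⟩ := p
    simp only [pvBLoop, List.mem_cons]
    cases hg : (PySem.Dict.mk dic2).get? k with
    | none =>
      constructor
      · intro h; cases h
      · intro h; have := h (k, v) (Or.inl rfl); simp_all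
    | some w =>
      show (if v ≠ w then false else pvBLoop dic2 rest) = true ↔ _
      split_ifs with hv
      · constructor
        · intro h; cases h
        · intro h; have := h (k, v) (Or.inl rfl); simp_all
      · push Not at hv; subst hv
        rw [ih]
        constructor
        · intro h x hx
          rcases hx with rfl | hx
          · exact hg
          · exact h x hx
        · intro h x hx; exact h x (Or.inr hx)

-- first-match lookup in an assoc list with distinct keys finds exactly the stored pair
theorem get?_mk_of_mem (d : List (String × Int)) (hnd : (d.map Prod.fst).Nodup)
    (k : String) (v : Int) (h : (k, v) ∈ d) : (PySem.Dict.mk d).get? k = some v := by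
  have hkeys : (PySem.Dict.mk d).keys.Nodup := by simpa [PySem.Dict.keys_mk] using hnd
  exact PySem.Dict.get?_of_mem_items (PySem.Dict.mk d) h hkeys

theorem contains_mk_iff (d : List (String × Int)) (k : String) :
    (PySem.Dict.mk d).contains k = true ↔ k ∈ d.map Prod.fst := by
  simpa [PySem.Dict.keys_mk] using
    (PySem.Dict.contains_iff_mem_keys (d := PySem.Dict.mk d) (k := k))


theorem isSome_get?_mk (d : List (String × Int)) (k : String) :
    ((PySem.Dict.mk d).get? k).isSome = true ↔ k ∈ d.map Prod.fst := by
  rw [← PySem.Dict.contains_eq_isSome_get?]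
  exact contains_mk_iff d k

-- the two programs agree (as a ↔ on returning true)
theorem main_iff (dic1 dic2 : List (String × Int)) (h1 : (dic1.map Prod.fst).Nodup)
    (h2 : (dic2.map Prod.fst).Nodup) :
    dics_equal dic1 dic2 = true ↔ dics_equal_alt dic1 dic2 = true := by
  have hlen1 : (dic1.map Prod.fst).length = dic1.length := List.length_map ..
  have hlen2 : (dic2.map Prod.fst).length = dic2.length := List.length_map ..
  rw [dics_equal, dics_equal_alt, pvALoop_eq_true_iff]
  constructor
  · intro hA
    have hall : ∀ k, k ∈ dic1.map Prod.fst ∨ k ∈ dic2.map Prod.fst →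
        (PySem.Dict.mk dic2).contains k = true ∧ (PySem.Dict.mk dic1).contains k = true ∧
        (PySem.Dict.mk dic1).get? k = (PySem.Dict.mk dic2).get? k := by
      intro k hk
      exact hA k (by simpa [PySem.Set.mem_union, PySem.Set.mem_ofList] using hk)
    have hsub12 : dic1.map Prod.fst ⊆ dic2.map Prod.fst := by
      intro k hk
      exact (contains_mk_iff dic2 k).mp (hall k (Or.inl hk)).1
    have hsub21 : dic2.map Prod.fst ⊆ dic1.map Prod.fst := by
      intro k hk
      exact (contains_mk_iff dic1 k).mp (hall k (Or.inr hk)).2.1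
    have hlen : dic1.length = dic2.length := by
      have a := (h1.subperm hsub12).length_le
      have b := (h2.subperm hsub21).length_le
      omega
    rw [if_neg (by omega), pvBLoop_eq_true_iff]
    intro p hp
    have hg1 : (PySem.Dict.mk dic1).get? p.1 = some p.2 := get?_mk_of_mem dic1 h1 p.1 p.2 hp
    have := (hall p.1 (Or.inl (List.mem_map_of_mem hp))).2.2
    rw [← this]; exact hg1
  · intro hB
    by_cases hlen : dic1.length = dic2.length
    · rw [if_neg (by omega), pvBLoop_eq_true_iff] at hB
      have hsub12 : dic1.map Prod.fst ⊆ dic2.map Prod.fst := by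
        intro k hk
        obtain ⟨⟨k', v⟩, hmem, rfl⟩ := List.mem_map.mp hk
        exact (isSome_get?_mk dic2 k').mp (by rw [hB _ hmem]; rfl)
      have hperm : (dic1.map Prod.fst).Perm (dic2.map Prod.fst) :=
        (h1.subperm hsub12).perm_of_length_le (by omega)
      have hsub21 : dic2.map Prod.fst ⊆ dic1.map Prod.fst := hperm.symm.subset
      intro k hk
      have hk' : k ∈ dic1.map Prod.fst ∨ k ∈ dic2.map Prod.fst := by
        simpa [PySem.Set.mem_union, PySem.Set.mem_ofList] using hk
      have hk1 : k ∈ dic1.map Prod.fst := by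
        rcases hk' with h | h
        · exact h
        · exact hsub21 h
      obtain ⟨⟨k', v⟩, hmem, hfst⟩ := List.mem_map.mp hk1
      cases hfst
      refine ⟨(contains_mk_iff dic2 _).mpr (hsub12 hk1), (contains_mk_iff dic1 _).mpr hk1, ?_⟩
      rw [get?_mk_of_mem dic1 h1 k' v hmem, hB _ hmem]
    · rw [if_pos (by omega)] at hB
      cases hB

-- ===== VERDICT (by name: the statement is the Claim_ definition above) =====
theorem dics_equal_spec : Claim_equal_dics_equal := by
  intro dic1 dic2 _ hpre
  unfold Spec_dics_equal
  have h := main_iff dic1 dic2 hpre.1 hpre.2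
  cases hA : dics_equal dic1 dic2 <;> cases hB : dics_equal_alt dic1 dic2 <;> simp_all
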